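-- pv_equiv track=rewrite | github.com/jithendraTR/AI-Repository-Analyzer | analyzers/risk_analysis.py | _get_file_type
-- ===== SOURCE A (Python) =====
-- def _get_file_type(relative_path: str) -> str:
--     """Determine file type category"""
--     path_lower = relative_path.lower()
--
--     if any(keyword in path_lower for keyword in ['main', 'index', 'app']):
--         return "Entry Point"
--     elif any(keyword in path_lower for keyword in ['api', 'endpoint', 'controller']):
--         return "API/Controller"
--     elif any(keyword in path_lower for keyword in ['core', 'service', 'business']):
--         return "Business Logic"
--     elif any(keyword in path_lower for keyword in ['model', 'data', 'db']):
--         return "Data Layer"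
--     elif any(keyword in path_lower for keyword in ['util', 'helper', 'common']):
--         return "Utility"
--     elif any(keyword in path_lower for keyword in ['config', 'settings']):
--         return "Configuration"
--     else:
--         return "General"
-- ===== SOURCE B (Python) =====
-- # B: min-priority accumulation over a flat keyword map instead of a short-circuiting category ladder.
-- _KEYWORD_INFO = {
--     "main": (0, "Entry Point"), "index": (0, "Entry Point"), "app": (0, "Entry Point"),
--     "api": (1, "API/Controller"), "endpoint": (1, "API/Controller"), "controller": (1, "API/Controller"),
--     "core": (2, "Business Logic"), "service": (2, "Business Logic"), "business": (2, "Business Logic"),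
--     "model": (3, "Data Layer"), "data": (3, "Data Layer"), "db": (3, "Data Layer"),
--     "util": (4, "Utility"), "helper": (4, "Utility"), "common": (4, "Utility"),
--     "config": (5, "Configuration"), "settings": (5, "Configuration"),
-- }
--
-- def _get_file_type(relative_path: str) -> str:
--     path_lower = relative_path.lower()
--     best = None
--     for keyword, (priority, label) in _KEYWORD_INFO.items():
--         if keyword in path_lower and (best is None or priority < best[0]):
--             best = (priority, label)
--     return "General" if best is None else best[1]
-- ===== Notes on version B (the rewrite author's own statement) =====
-- stated objective: alternative
-- what changed: Instead of a short-circuiting six-branch ladder of per-category any() tests, B scans all keywords of one flat keyword->(priority,label) map and accumulates the minimum-priority match, returning its label (or 'General' if nothing matched).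
import Mathlib
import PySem

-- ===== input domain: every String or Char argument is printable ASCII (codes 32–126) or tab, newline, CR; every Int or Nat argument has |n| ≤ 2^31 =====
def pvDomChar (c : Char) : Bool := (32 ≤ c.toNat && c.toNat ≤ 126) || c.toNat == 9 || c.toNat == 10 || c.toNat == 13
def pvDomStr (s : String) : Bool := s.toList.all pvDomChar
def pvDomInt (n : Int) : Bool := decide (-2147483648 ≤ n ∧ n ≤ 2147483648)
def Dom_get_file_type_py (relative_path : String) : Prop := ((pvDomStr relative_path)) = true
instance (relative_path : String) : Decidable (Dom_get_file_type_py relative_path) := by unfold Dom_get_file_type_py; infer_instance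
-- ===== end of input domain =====

-- B replaces A's short-circuiting category ladder with a min-priority accumulation over one flat keyword map (alternative decomposition, same cost).


-- ===== PORT A =====
def get_file_type_py (relative_path : String) : String :=
  let path_lower := PySem.Str.lower relative_path
  if ["main", "index", "app"].any (fun keyword => PySem.Str.isIn keyword path_lower) then
    "Entry Point"
  else if ["api", "endpoint", "controller"].any (fun keyword => PySem.Str.isIn keyword path_lower) then
    "API/Controller"
  else if ["core", "service", "business"].any (fun keyword => PySem.Str.isIn keyword path_lower) then
    "Business Logic"
  else if ["model", "data", "db"].any (fun keyword => PySem.Str.isIn keyword path_lower) then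
    "Data Layer"
  else if ["util", "helper", "common"].any (fun keyword => PySem.Str.isIn keyword path_lower) then
    "Utility"
  else if ["config", "settings"].any (fun keyword => PySem.Str.isIn keyword path_lower) then
    "Configuration"
  else
    "General"

-- ===== PORT B =====
-- flat keyword -> (priority, label) map (a dict in Source B; iterated in insertion order)
def pvKeywordInfo : List (String × Int × String) :=
  [("main", 0, "Entry Point"), ("index", 0, "Entry Point"), ("app", 0, "Entry Point"),
   ("api", 1, "API/Controller"), ("endpoint", 1, "API/Controller"), ("controller", 1, "API/Controller"),
   ("core", 2, "Business Logic"), ("service", 2, "Business Logic"), ("business", 2, "Business Logic"),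
   ("model", 3, "Data Layer"), ("data", 3, "Data Layer"), ("db", 3, "Data Layer"),
   ("util", 4, "Utility"), ("helper", 4, "Utility"), ("common", 4, "Utility"),
   ("config", 5, "Configuration"), ("settings", 5, "Configuration")]

def get_file_type_py_alt (relative_path : String) : String :=
  let path_lower := PySem.Str.lower relative_path
  let best := pvKeywordInfo.foldl
    (fun (best : Option (Int × String)) e =>
      if PySem.Str.isIn e.1 path_lower
          && (match best with | none => true | some b => decide (e.2.1 < b.1)) then
        some e.2
      else best) none
  match best with
  | none => "General"
  | some b => b.2

-- ===== PRECONDITION & SPEC =====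
def Spec_get_file_type_py (relative_path : String) (out : String) : Prop := out = get_file_type_py_alt relative_path
instance (relative_path : String) (out : String) : Decidable (Spec_get_file_type_py relative_path out) := by unfold Spec_get_file_type_py; infer_instance

-- ===== CLAIM (what is proved, stated in full; the proofs are below) =====
def Claim_equal_get_file_type_py : Prop := ∀ (relative_path : String), Dom_get_file_type_py relative_path → Spec_get_file_type_py relative_path (get_file_type_py relative_path)

-- ===== LEMMAS AND PROOFS =====

-- B's fold step (abbreviation used only in the proofs)
def pvStep (pl : String) (best : Option (Int × String)) (e : String × Int × String) : Option (Int × String) :=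
  if PySem.Str.isIn e.1 pl
      && (match best with | none => true | some b => decide (e.2.1 < b.1)) then
    some e.2
  else best

-- once an element of minimal priority is recorded, later elements of ≥ priority never replace it
theorem pvFold_stay (pl : String) (v : Int × String) (l : List (String × Int × String))
    (h : ∀ e ∈ l, v.1 ≤ e.2.1) :
    l.foldl (pvStep pl) (some v) = some v := by
  induction l with
  | nil => rfl
  | cons e t ih =>
    have hp : v.1 ≤ e.2.1 := h e (by simp)
    have hs : pvStep pl (some v) e = some v := by
      simp [pvStep]; omega
    simp only [List.foldl, hs]
    exact ih (fun e' he' => h e' (by simp [he']))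

-- on a priority-sorted list, the min-priority fold returns the first match
theorem pvFold_none (pl : String) (l : List (String × Int × String))
    (h : l.Pairwise (fun a b => a.2.1 ≤ b.2.1)) :
    l.foldl (pvStep pl) none = (l.find? (fun e => PySem.Str.isIn e.1 pl)).map (fun e => e.2) := by
  induction l with
  | nil => rfl
  | cons e t ih =>
    rcases List.pairwise_cons.mp h with ⟨hhead, htail⟩
    cases hm : PySem.Str.isIn e.1 pl with
    | true =>
      have hs : pvStep pl none e = some e.2 := by
        simp only [pvStep, hm, Bool.true_and]; rfl
      rw [List.foldl_cons, hs, pvFold_stay pl e.2 t hhead, List.find?_cons]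
      simp only [hm, Option.map_some]
    | false =>
      have hs : pvStep pl none e = none := by
        simp only [pvStep, hm, Bool.false_and]; rfl
      rw [List.foldl_cons, hs, ih htail, List.find?_cons]
      simp only [hm]

-- in a keyword group every entry carries the same (priority, label): first match = any match
theorem pvFindMap (p : String → Bool) (l : List (String × Int × String)) (v : Int × String)
    (h : ∀ e ∈ l, e.2 = v) :
    ((l.find? (fun e => p e.1)).map (fun e => e.2)) = (if l.any (fun e => p e.1) then some v else none) := by
  induction l with
  | nil => rfl
  | cons e t ih =>
    cases hm : p e.1 with
    | true =>
      simp [List.any_cons, hm, h e (by simp)]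
    | false =>
      rw [List.find?_cons]
      simp only [hm, List.any_cons, Bool.false_or]
      exact ih (fun e' he' => h e' (by simp [he']))

-- the whole equivalence, over the lowered path
theorem pvMain (pl : String) :
    (if ["main", "index", "app"].any (fun keyword => PySem.Str.isIn keyword pl) then "Entry Point"
     else if ["api", "endpoint", "controller"].any (fun keyword => PySem.Str.isIn keyword pl) then "API/Controller"
     else if ["core", "service", "business"].any (fun keyword => PySem.Str.isIn keyword pl) then "Business Logic"
     else if ["model", "data", "db"].any (fun keyword => PySem.Str.isIn keyword pl) then "Data Layer"
     else if ["util", "helper", "common"].any (fun keyword => PySem.Str.isIn keyword pl) then "Utility"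
     else if ["config", "settings"].any (fun keyword => PySem.Str.isIn keyword pl) then "Configuration"
     else "General")
    = (match pvKeywordInfo.foldl (pvStep pl) none with
       | none => "General"
       | some b => b.2) := by
  rw [pvFold_none pl pvKeywordInfo (by decide)]
  rw [show pvKeywordInfo =
      [("main", (0 : Int), "Entry Point"), ("index", 0, "Entry Point"), ("app", 0, "Entry Point")] ++
      ([("api", 1, "API/Controller"), ("endpoint", 1, "API/Controller"), ("controller", 1, "API/Controller")] ++
      ([("core", 2, "Business Logic"), ("service", 2, "Business Logic"), ("business", 2, "Business Logic")] ++
      ([("model", 3, "Data Layer"), ("data", 3, "Data Layer"), ("db", 3, "Data Layer")] ++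
      ([("util", 4, "Utility"), ("helper", 4, "Utility"), ("common", 4, "Utility")] ++
       [("config", 5, "Configuration"), ("settings", 5, "Configuration")])))) from rfl]
  rw [List.find?_append, List.find?_append, List.find?_append, List.find?_append, List.find?_append]
  rw [Option.map_or, Option.map_or, Option.map_or, Option.map_or, Option.map_or]
  rw [pvFindMap (fun k => PySem.Str.isIn k pl) _ ((0 : Int), "Entry Point") (by decide),
      pvFindMap (fun k => PySem.Str.isIn k pl) _ ((1 : Int), "API/Controller") (by decide),
      pvFindMap (fun k => PySem.Str.isIn k pl) _ ((2 : Int), "Business Logic") (by decide),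
      pvFindMap (fun k => PySem.Str.isIn k pl) _ ((3 : Int), "Data Layer") (by decide),
      pvFindMap (fun k => PySem.Str.isIn k pl) _ ((4 : Int), "Utility") (by decide),
      pvFindMap (fun k => PySem.Str.isIn k pl) _ ((5 : Int), "Configuration") (by decide)]
  simp only [List.any_cons, List.any_nil, Bool.or_false]
  split_ifs <;> simp_all [Option.or]

-- ===== VERDICT (by name: the statement is the Claim_ definition above) =====
theorem get_file_type_py_spec : Claim_equal_get_file_type_py := by
  intro relative_path _
  exact pvMain (PySem.Str.lower relative_path)
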